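-- pv_equiv track=rewrite | github.com/kuznetsovvj/education | algorithms/codeforces/1638b.py | solution
-- ===== SOURCE A (Python) =====
-- def solution(seq):
--     odd = [item for item in seq if item % 2 == 1]
--     even = [item for item in seq if item % 2 == 0]
--     if len(odd) > 1:
--         for i in range(1, len(odd)):
--             if odd[i] < odd[i-1]:
--                 return 'NO'
--     if len(even) > 1:
--         for i in range(1, len(even)):
--             if even[i] < even[i-1]:
--                 return 'NO'
--     return 'YES'
-- ===== SOURCE B (Python) =====
-- def solution(seq):
--     last_odd = None
--     last_even = None
--     for item in seq:
--         if item % 2 == 1: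
--             if last_odd is not None and item < last_odd:
--                 return 'NO'
--             last_odd = item
--         else:
--             if last_even is not None and item < last_even:
--                 return 'NO'
--             last_even = item
--     return 'YES'
-- ===== Notes on version B (the rewrite author's own statement) =====
-- stated objective: simpler
-- what changed: B makes a single interleaved pass keeping only two scalar 'last seen' values (last_odd/last_even) with early exit, instead of building two filtered lists and scanning each with index loops.
import Mathlib
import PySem

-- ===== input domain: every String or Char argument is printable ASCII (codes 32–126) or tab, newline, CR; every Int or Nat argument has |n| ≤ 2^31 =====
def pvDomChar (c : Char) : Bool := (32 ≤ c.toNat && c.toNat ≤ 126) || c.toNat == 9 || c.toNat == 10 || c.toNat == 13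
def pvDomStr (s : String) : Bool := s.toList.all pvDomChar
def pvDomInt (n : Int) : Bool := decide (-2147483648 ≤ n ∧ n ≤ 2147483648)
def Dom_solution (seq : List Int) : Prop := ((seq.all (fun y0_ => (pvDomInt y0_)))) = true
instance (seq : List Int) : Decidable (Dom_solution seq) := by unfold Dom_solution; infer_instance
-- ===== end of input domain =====

-- B: one interleaved pass with two scalar "last seen" values instead of two filtered lists each scanned by an index loop (simpler: O(1) extra space).

-- ===== PORT A =====
-- the Python index loop 'for i in range(1, len(l)): if l[i] < l[i-1]: return NO'
-- (early return = `true`); l[i] via pyGet?, exact since i ∈ [1, len)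
def solLoopA (l : List Int) (idxs : List Int) : Bool :=
  match idxs with
  | [] => false
  | i :: rest =>
    match PySem.List.pyGet? l i, PySem.List.pyGet? l (i - 1) with
    | some a, some b => if a < b then true else solLoopA l rest
    | _, _ => solLoopA l rest

def solution (seq : List Int) : String :=
  let odd := seq.filter (fun item => PySem.Int.mod item 2 == 1)
  let even := seq.filter (fun item => PySem.Int.mod item 2 == 0)
  if 1 < odd.length && solLoopA odd (PySem.List.pyRange 1 (odd.length : Int) 1) then "NO"
  else if 1 < even.length && solLoopA even (PySem.List.pyRange 1 (even.length : Int) 1) then "NO"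
  else "YES"

-- ===== PORT B =====
-- Source B's loop: state = the two optional "last seen" values
def solGoB : List Int → Option Int → Option Int → String
  | [], _, _ => "YES"
  | x :: xs, lastOdd, lastEven =>
    if PySem.Int.mod x 2 == 1 then
      match lastOdd with
      | some a => if x < a then "NO" else solGoB xs (some x) lastEven
      | none => solGoB xs (some x) lastEven
    else
      match lastEven with
      | some a => if x < a then "NO" else solGoB xs lastOdd (some x)
      | none => solGoB xs lastOdd (some x)

def solution_alt (seq : List Int) : String := solGoB seq none none

-- ===== PRECONDITION & SPEC =====
def Spec_solution (seq : List Int) (out : String) : Prop := out = solution_alt seq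
instance (seq : List Int) (out : String) : Decidable (Spec_solution seq out) := by unfold Spec_solution; infer_instance

-- ===== CLAIM (what is proved, stated in full; the proofs are below) =====
def Claim_equal_solution : Prop := ∀ (seq : List Int), Dom_solution seq → Spec_solution seq (solution seq)

-- ===== LEMMAS AND PROOFS =====

-- proof-side characterisation: a list has an adjacent descent
def hasDescent : List Int → Bool
  | a :: b :: rest => if b < a then true else hasDescent (b :: rest)
  | _ => false

-- B's per-parity check: compare against the optional last-seen value, then the rest
def chk : Option Int → List Int → Bool
  | none, l => hasDescent l
  | some a, l => hasDescent (a :: l)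

theorem chk_cons (o : Option Int) (x : Int) (l : List Int) :
    chk o (x :: l) = ((match o with | some a => decide (x < a) | none => false) || chk (some x) l) := by
  cases o with
  | none => simp [chk]
  | some a => simp [chk, hasDescent]

theorem goB_eq (xs : List Int) : ∀ (lo le : Option Int),
    solGoB xs lo le =
      if chk lo (xs.filter (fun i => PySem.Int.mod i 2 == 1)) ||
         chk le (xs.filter (fun i => PySem.Int.mod i 2 == 0)) then "NO" else "YES" := by
  induction xs with
  | nil => intro lo le; cases lo <;> cases le <;> simp [solGoB, chk, hasDescent]
  | cons x xs ih =>
    intro lo le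
    rcases PySem.Int.mod_two_eq x with h0 | h1
    · -- x is even
      rw [show ((x::xs).filter (fun i => PySem.Int.mod i 2 == 1))
            = xs.filter (fun i => PySem.Int.mod i 2 == 1) from List.filter_cons_of_neg (by simp only [h0]; decide),
          show ((x::xs).filter (fun i => PySem.Int.mod i 2 == 0))
            = x :: xs.filter (fun i => PySem.Int.mod i 2 == 0) from List.filter_cons_of_pos (by simp only [h0]; decide),
          chk_cons]
      have hb : (PySem.Int.mod x 2 == 1) = false := by rw [h0]; decide
      simp only [solGoB, hb, Bool.false_eq_true, if_false]
      cases le with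
      | none => rw [ih]; simp
      | some a =>
        by_cases hlt : x < a
        · simp [hlt]
        · simp [hlt, ih]
    · -- x is odd
      rw [show ((x::xs).filter (fun i => PySem.Int.mod i 2 == 1))
            = x :: xs.filter (fun i => PySem.Int.mod i 2 == 1) from List.filter_cons_of_pos (by simp only [h1]; decide),
          show ((x::xs).filter (fun i => PySem.Int.mod i 2 == 0))
            = xs.filter (fun i => PySem.Int.mod i 2 == 0) from List.filter_cons_of_neg (by simp only [h1]; decide),
          chk_cons]
      have hb : (PySem.Int.mod x 2 == 1) = true := by rw [h1]; decide
      simp only [solGoB, hb, if_true]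
      cases lo with
      | none => rw [ih]; simp
      | some a =>
        by_cases hlt : x < a
        · simp [hlt]
        · simp [hlt, ih]

-- A's index loop over range(k, len l) equals the adjacent-descent scan of drop (k-1)
theorem loopA_drop (l : List Int) : ∀ (k : Nat), 1 ≤ k →
    solLoopA l (PySem.List.pyRange (k : Int) (l.length : Int) 1) = hasDescent (l.drop (k - 1)) := by
  intro k hk
  induction h : l.length - k generalizing k with
  | zero =>
    have hle : (l.length : Int) ≤ (k : Int) := by exact_mod_cast Nat.le_of_sub_eq_zero h
    rw [PySem.List.pyRange_one_eq_nil hle]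
    have : l.length ≤ k - 1 + 1 := by omega
    have hdrop : l.drop (k - 1) = [] ∨ ∃ a, l.drop (k - 1) = [a] := by
      have hlen : (l.drop (k - 1)).length ≤ 1 := by
        rw [List.length_drop]; omega
      match hd : l.drop (k - 1) with
      | [] => exact Or.inl rfl
      | [a] => exact Or.inr ⟨a, rfl⟩
      | a :: b :: r => rw [hd] at hlen; simp at hlen
    rcases hdrop with hd | ⟨a, hd⟩ <;> simp [solLoopA, hd, hasDescent]
  | succ n ih =>
    have hkl : k < l.length := by omega
    have hklt : (k : Int) < (l.length : Int) := by exact_mod_cast hkl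
    rw [PySem.List.pyRange_one_cons hklt]
    have hget : PySem.List.pyGet? l (k : Int) = some l[k] := by
      simp [PySem.List.pyGet?_natCast, List.getElem?_eq_getElem hkl]
    have hk1 : ((k : Int) - 1) = ((k - 1 : Nat) : Int) := by rw [Nat.cast_sub hk]; norm_num
    have hk1l : k - 1 < l.length := by omega
    have hget1 : PySem.List.pyGet? l ((k : Int) - 1) = some l[k-1] := by
      rw [hk1]; simp [PySem.List.pyGet?_natCast, List.getElem?_eq_getElem hk1l]
    have hdrop : l.drop (k - 1) = l[k-1] :: l.drop k := by
      have h11 : k - 1 + 1 = k := by omega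
      have := List.drop_eq_getElem_cons hk1l (l := l)
      rwa [h11] at this
    have hdrop2 : l.drop k = l[k] :: l.drop (k + 1) := by
      rw [List.drop_eq_getElem_cons hkl]
    rw [hdrop, hdrop2]
    simp only [solLoopA, hget, hget1, hasDescent]
    by_cases hlt : l[k] < l[k-1]
    · simp [hlt]
    · have hcast : ((k : Int) + 1) = ((k + 1 : Nat) : Int) := by push_cast; ring
      rw [if_neg hlt, if_neg hlt, hcast, ih (k + 1) (by omega) (by omega),
        Nat.add_sub_cancel, hdrop2]

theorem loopA_eq (l : List Int) :
    solLoopA l (PySem.List.pyRange 1 (l.length : Int) 1) = hasDescent l := by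
  have := loopA_drop l 1 le_rfl
  simpa using this

theorem hasDescent_short (l : List Int) (h : l.length ≤ 1) : hasDescent l = false := by
  match l with
  | [] => rfl
  | [a] => rfl
  | a :: b :: r => simp at h

-- ===== VERDICT (by name: the statement is the Claim_ definition above) =====
theorem solution_spec : Claim_equal_solution := by
  intro seq _
  unfold Spec_solution solution solution_alt
  rw [goB_eq]
  simp only [chk]
  set odd := seq.filter (fun i => PySem.Int.mod i 2 == 1) with hodd
  set even := seq.filter (fun i => PySem.Int.mod i 2 == 0) with heven
  by_cases ho : 1 < odd.length
  · by_cases he : 1 < even.length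
    · simp only [ho, he, loopA_eq, decide_true, Bool.true_and]
      by_cases h1 : hasDescent odd = true
      · simp [h1]
      · by_cases h2 : hasDescent even = true <;> simp [h1, h2]
    · have : hasDescent even = false := hasDescent_short even (by omega)
      simp [ho, he, loopA_eq, this]
  · have h1 : hasDescent odd = false := hasDescent_short odd (by omega)
    by_cases he : 1 < even.length
    · simp [ho, he, loopA_eq, h1]
    · have h2 : hasDescent even = false := hasDescent_short even (by omega)
      simp [ho, he, h1, h2]
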